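-- pv_equiv track=rewrite | github.com/SkyJinXX/LeetCode-Practice | OA-mock-csc-2.py | maxDropPoints
-- ===== SOURCE A (Python) =====
-- def maxDropPoints(n, x_coords, y_coords):
--     dic_x = {}
--     dic_y = {}
--     for i in range(n):
--         if x_coords[i] not in dic_x:
--             dic_x[x_coords[i]] = 1
--         else:
--             dic_x[x_coords[i]] += 1
--
--         if y_coords[i] not in dic_y:
--             dic_y[y_coords[i]] = 1
--         else:
--             dic_y[y_coords[i]] += 1
--
--     return max(max(dic_x.values()), max(dic_y.values()))
-- ===== SOURCE B (Python) =====
-- def maxDropPoints(n, x_coords, y_coords):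
--     def best_run(vals):
--         vals = sorted(vals)
--         runs = []
--         run = 0
--         prev = None
--         for v in vals:
--             run = run + 1 if run > 0 and v == prev else 1
--             runs.append(run)
--             prev = v
--         return max(runs)
--     return max(best_run(x_coords[:n]), best_run(y_coords[:n]))
-- ===== Notes on version B (the rewrite author's own statement) =====
-- stated objective: alternative
-- what changed: Replaces the dict-based frequency counting with slicing each list to its first n elements, sorting, and scanning adjacent equal elements for the longest run.
import Mathlib
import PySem

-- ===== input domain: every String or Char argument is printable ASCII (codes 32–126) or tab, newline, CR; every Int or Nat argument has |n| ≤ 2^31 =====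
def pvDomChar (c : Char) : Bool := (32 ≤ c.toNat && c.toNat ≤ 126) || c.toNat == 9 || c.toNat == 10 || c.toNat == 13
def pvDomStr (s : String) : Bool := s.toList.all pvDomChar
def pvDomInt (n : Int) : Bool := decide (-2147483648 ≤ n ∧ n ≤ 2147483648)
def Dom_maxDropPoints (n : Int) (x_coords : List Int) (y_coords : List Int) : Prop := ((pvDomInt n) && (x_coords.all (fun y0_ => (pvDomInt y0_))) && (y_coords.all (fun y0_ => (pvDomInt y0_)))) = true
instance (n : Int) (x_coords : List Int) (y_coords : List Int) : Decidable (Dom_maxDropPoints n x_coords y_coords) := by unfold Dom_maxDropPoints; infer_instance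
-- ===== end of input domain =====

-- B replaces A's dict-based frequency counting by sort-each-prefix-and-scan-runs (alternative algorithm, no dicts).

-- ===== PORT A =====
-- the loop 'for i in range(n)' builds both counting dicts; pyGetD's default 0 is never read under Pre_ (indices in range)
def maxDropPoints (n : Int) (x_coords : List Int) (y_coords : List Int) : Int :=
  let dicts := (PySem.List.pyRange 0 n 1).foldl
    (fun (st : PySem.Dict Int Int × PySem.Dict Int Int) i =>
      (if st.1.contains (PySem.List.pyGetD x_coords i 0) then
         st.1.insert (PySem.List.pyGetD x_coords i 0) (st.1.getD (PySem.List.pyGetD x_coords i 0) 0 + 1)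
       else st.1.insert (PySem.List.pyGetD x_coords i 0) 1,
       if st.2.contains (PySem.List.pyGetD y_coords i 0) then
         st.2.insert (PySem.List.pyGetD y_coords i 0) (st.2.getD (PySem.List.pyGetD y_coords i 0) 0 + 1)
       else st.2.insert (PySem.List.pyGetD y_coords i 0) 1))
    (PySem.Dict.empty, PySem.Dict.empty)
  -- max(dic.values()): none = ValueError on an empty dict, excluded by Pre_
  let mx := match PySem.List.max? dicts.1.values (fun v => v) with | some m => m | none => 0
  let my := match PySem.List.max? dicts.2.values (fun v => v) with | some m => m | none => 0
  max mx my

-- ===== PORT B =====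
-- best_run(vals): sort, then scan adjacent elements collecting run lengths; max(runs) at the end
-- (none = ValueError on an empty prefix, excluded by Pre_)
def bestRun (vals : List Int) : Int :=
  let s := PySem.List.sorted vals (fun v => v) false
  let st := s.foldl (fun (st : List Int × Int × Option Int) v =>
      let run := if 0 < st.2.1 ∧ some v = st.2.2 then st.2.1 + 1 else 1
      (st.1 ++ [run], run, some v)) ([], 0, none)
  match PySem.List.max? st.1 (fun v => v) with | some m => m | none => 0

def maxDropPoints_alt (n : Int) (x_coords : List Int) (y_coords : List Int) : Int :=
  max (bestRun (PySem.List.slice x_coords none (some n)))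
      (bestRun (PySem.List.slice y_coords none (some n)))

-- ===== PRECONDITION & SPEC =====
-- Pre_ excludes exactly the inputs where A raises: n ≤ 0 (ValueError: max() of an empty dict)
-- and n larger than either list (IndexError); A returns normally on everything else.
def Pre_maxDropPoints (n : Int) (x_coords : List Int) (y_coords : List Int) : Prop :=
  1 ≤ n ∧ n ≤ (x_coords.length : Int) ∧ n ≤ (y_coords.length : Int)
instance (n : Int) (x_coords : List Int) (y_coords : List Int) : Decidable (Pre_maxDropPoints n x_coords y_coords) := by unfold Pre_maxDropPoints; infer_instance
def pvWitness_maxDropPoints : Int × List Int × List Int := (2, [1, 1, 5], [1, 2])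

def Spec_maxDropPoints (n : Int) (x_coords : List Int) (y_coords : List Int) (out : Int) : Prop := out = maxDropPoints_alt n x_coords y_coords
instance (n : Int) (x_coords : List Int) (y_coords : List Int) (out : Int) : Decidable (Spec_maxDropPoints n x_coords y_coords out) := by unfold Spec_maxDropPoints; infer_instance

-- ===== CLAIM (what is proved, stated in full; the proofs are below) =====
def Claim_equal_maxDropPoints : Prop := ∀ (n : Int) (x_coords : List Int) (y_coords : List Int), Dom_maxDropPoints n x_coords y_coords → Pre_maxDropPoints n x_coords y_coords → Spec_maxDropPoints n x_coords y_coords (maxDropPoints n x_coords y_coords)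

-- ===== LEMMAS AND PROOFS =====

-- B's scan step, named for the proofs (definitionally the lambda inside bestRun)
def pvStep (st : List Int × Int × Option Int) (v : Int) : List Int × Int × Option Int :=
  let run := if 0 < st.2.1 ∧ some v = st.2.2 then st.2.1 + 1 else 1
  (st.1 ++ [run], run, some v)

-- the run lengths recorded while scanning s, with a pending run of r copies of a
def runsFrom (a r : Int) : List Int → List Int
  | [] => []
  | v :: t => if v = a then (r + 1) :: runsFrom a (r + 1) t else 1 :: runsFrom v 1 t

-- maximal run length of a list whose first run extends a pending run of r copies of a
def maxRunExt (a r : Int) : List Int → Int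
  | [] => r
  | v :: t => if v = a then maxRunExt a (r + 1) t else max r (maxRunExt v 1 t)

lemma foldl_pvStep (s : List Int) : ∀ a r (acc : List Int), 1 ≤ r →
    (s.foldl pvStep (acc, r, some a)).1 = acc ++ runsFrom a r s := by
  induction s with
  | nil => intro a r acc _; simp [runsFrom]
  | cons v t ih =>
    intro a r acc h1
    by_cases h : v = a
    · subst h
      have hs : pvStep (acc, r, some v) v = (acc ++ [r + 1], r + 1, some v) := by
        simp [pvStep]
        omega
      rw [List.foldl_cons, hs, ih v (r + 1) (acc ++ [r + 1]) (by omega),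
        runsFrom, if_pos rfl, List.append_assoc, List.singleton_append]
    · have hs : pvStep (acc, r, some a) v = (acc ++ [1], 1, some v) := by
        simp [pvStep, h]
      rw [List.foldl_cons, hs, ih v 1 (acc ++ [1]) le_rfl,
        runsFrom, if_neg h, List.append_assoc, List.singleton_append]

lemma foldl_max_max (L : List Int) : ∀ a b : Int, L.foldl max (max a b) = max a (L.foldl max b) := by
  induction L with
  | nil => intro a b; rfl
  | cons c t ih =>
    intro a b
    rw [List.foldl_cons, List.foldl_cons, max_assoc, ih]

lemma maxRunExt_eq_foldl (s : List Int) : ∀ a r, maxRunExt a r s = (runsFrom a r s).foldl max r := by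
  induction s with
  | nil => intro a r; simp [maxRunExt, runsFrom]
  | cons v t ih =>
    intro a r
    by_cases h : v = a
    · subst h
      rw [show maxRunExt v r (v :: t) = maxRunExt v (r + 1) t from by simp [maxRunExt],
        runsFrom, if_pos rfl, List.foldl_cons, ih,
        show max r (r + 1) = r + 1 by omega]
    · rw [show maxRunExt a r (v :: t) = max r (maxRunExt v 1 t) from by simp [maxRunExt, h],
        runsFrom, if_neg h, List.foldl_cons, ih,
        show max r 1 = max r 1 from rfl, foldl_max_max]

lemma maxRunExt_spec (s : List Int) : ∀ a r, s.Pairwise (· ≤ ·) → (∀ y ∈ s, a ≤ y) → 1 ≤ r →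
    (maxRunExt a r s = r + (s.count a : Int) ∨
      ∃ v ∈ s, v ≠ a ∧ maxRunExt a r s = (s.count v : Int))
    ∧ r + (s.count a : Int) ≤ maxRunExt a r s
    ∧ ∀ v ∈ s, v ≠ a → (s.count v : Int) ≤ maxRunExt a r s := by
  induction s with
  | nil => intro a r _ _ _; simp [maxRunExt]
  | cons v t ih =>
    intro a r hsort ha hr
    have hsort' := (List.pairwise_cons.mp hsort).2
    have hvt := (List.pairwise_cons.mp hsort).1
    have hav : a ≤ v := ha v (List.mem_cons_self ..)
    by_cases h : v = a
    · subst h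
      obtain ⟨hdisj, hlb, hub⟩ := ih v (r + 1) hsort' (fun y hy => le_trans hav (hvt y hy)) (by omega)
      rw [show maxRunExt v r (v :: t) = maxRunExt v (r + 1) t from by simp [maxRunExt]]
      refine ⟨?_, ?_, ?_⟩
      · rcases hdisj with h1 | ⟨w, hw, hwa, hwe⟩
        · left; rw [h1, List.count_cons_self]; push_cast; ring
        · right; exact ⟨w, List.mem_cons_of_mem _ hw, hwa,
            by rw [hwe, List.count_cons_of_ne (Ne.symm hwa)]⟩
      · rw [List.count_cons_self]; push_cast; omega
      · intro u hu hua
        have hut : u ∈ t := by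
          rcases List.mem_cons.mp hu with h' | h'
          · exact absurd h' hua
          · exact h'
        rw [List.count_cons_of_ne (Ne.symm hua)]
        exact hub u hut hua
    · have hltv : a < v := lt_of_le_of_ne hav (fun e => h e.symm)
      have hnat : a ∉ v :: t := by
        intro hc
        rcases List.mem_cons.mp hc with h' | h'
        · exact h h'.symm
        · have := hvt a h'
          omega
      have hca : ((v :: t).count a : Int) = 0 := by
        rw [List.count_eq_zero.mpr hnat]; rfl
      obtain ⟨hdisj, hlb, hub⟩ := ih v 1 hsort' hvt le_rfl
      rw [show maxRunExt a r (v :: t) = max r (maxRunExt v 1 t) from by simp [maxRunExt, h]]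
      set X := maxRunExt v 1 t with hX
      refine ⟨?_, by omega, ?_⟩
      · rcases le_total X r with hle | hle
        · left; rw [hca, max_eq_left hle]; ring
        · right
          rcases hdisj with h1 | ⟨w, hw, hwv, hwe⟩
          · exact ⟨v, List.mem_cons_self .., fun e => h e, by
              rw [max_eq_right hle, h1, List.count_cons_self]; push_cast; ring⟩
          · refine ⟨w, List.mem_cons_of_mem _ hw, ?_, by
              rw [max_eq_right hle, hwe, List.count_cons_of_ne (Ne.symm hwv)]⟩
            intro e
            have := hvt w hw
            omega
      · intro u hu hua
        rcases List.mem_cons.mp hu with h' | h'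
        · subst h'
          rw [List.count_cons_self]
          have := hlb
          push_cast at this ⊢
          omega
        · by_cases huv : u = v
          · subst huv
            rw [List.count_cons_self]
            have := hlb
            push_cast at this ⊢
            omega
          · rw [List.count_cons_of_ne (Ne.symm huv)]
            have := hub u h' huv
            omega

lemma bestRun_eq (l : List Int) (a : Int) (t : List Int)
    (hs : PySem.List.sorted l (fun v => v) false = a :: t) :
    bestRun l = maxRunExt a 1 t := by
  have h0 : pvStep ([], 0, none) a = ([1], 1, some a) := by simp [pvStep]
  have hfold : ((a :: t).foldl pvStep ([], 0, none)).1 = 1 :: runsFrom a 1 t := by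
    rw [List.foldl_cons, h0, foldl_pvStep t a 1 [1] le_rfl, List.singleton_append]
  have : bestRun l =
      match PySem.List.max? ((a :: t).foldl pvStep ([], 0, none)).1 (fun v => v) with
        | some m => m | none => 0 := by
    rw [bestRun, hs]; rfl
  rw [this, hfold, PySem.List.max?_id_cons, maxRunExt_eq_foldl]

lemma bestRun_isMax (l : List Int) : ∀ v ∈ l, (l.count v : Int) ≤ bestRun l := by
  intro v hv
  obtain ⟨a, t, hs⟩ : ∃ a t, PySem.List.sorted l (fun v => v) false = a :: t := by
    cases hsl : PySem.List.sorted l (fun v => v) false with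
    | nil => exact absurd ((PySem.List.sorted_eq_nil_iff l _ false).mp hsl ▸ hv) (by simp)
    | cons a t => exact ⟨a, t, rfl⟩
  have hperm := PySem.List.sorted_perm l (fun v => v) false
  have hpair : (a :: t).Pairwise (· ≤ ·) := by
    have := PySem.List.sorted_pairwise l (fun v => v)
    rw [hs] at this
    simpa using this
  have hvt : ∀ y ∈ t, a ≤ y := (List.pairwise_cons.mp hpair).1
  obtain ⟨_, hlb, hub⟩ := maxRunExt_spec t a 1 (List.pairwise_cons.mp hpair).2 hvt le_rfl
  rw [bestRun_eq l a t hs]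
  have hcnt : l.count v = (a :: t).count v := ((hs ▸ hperm).symm.count_eq v)
  rw [hcnt]
  by_cases hva : v = a
  · subst hva
    rw [List.count_cons_self]
    push_cast at hlb ⊢
    omega
  · rw [List.count_cons_of_ne (Ne.symm hva)]
    have hvmem : v ∈ t := by
      have : v ∈ a :: t := (hs ▸ hperm).mem_iff.mpr hv
      rcases List.mem_cons.mp this with h' | h'
      · exact absurd h' hva
      · exact h'
    exact hub v hvmem hva

lemma bestRun_exists (l : List Int) (hl : l ≠ []) : ∃ v ∈ l, bestRun l = (l.count v : Int) := by
  obtain ⟨a, t, hs⟩ : ∃ a t, PySem.List.sorted l (fun v => v) false = a :: t := by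
    cases hsl : PySem.List.sorted l (fun v => v) false with
    | nil => exact absurd ((PySem.List.sorted_eq_nil_iff l _ false).mp hsl) hl
    | cons a t => exact ⟨a, t, rfl⟩
  have hperm := PySem.List.sorted_perm l (fun v => v) false
  have hperm' : (a :: t).Perm l := hs ▸ hperm
  have hpair : (a :: t).Pairwise (· ≤ ·) := by
    have := PySem.List.sorted_pairwise l (fun v => v)
    rw [hs] at this
    simpa using this
  obtain ⟨hdisj, _, _⟩ := maxRunExt_spec t a 1 (List.pairwise_cons.mp hpair).2
    (List.pairwise_cons.mp hpair).1 le_rfl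
  rw [bestRun_eq l a t hs]
  rcases hdisj with h1 | ⟨w, hw, hwa, hwe⟩
  · refine ⟨a, hperm'.mem_iff.mp (List.mem_cons_self ..), ?_⟩
    rw [h1, ← hperm'.count_eq, List.count_cons_self]
    push_cast; ring
  · refine ⟨w, hperm'.mem_iff.mp (List.mem_cons_of_mem _ hw), ?_⟩
    rw [hwe, ← hperm'.count_eq, List.count_cons_of_ne (Ne.symm hwa)]

-- A's per-list value (max over the counting dict's values) equals B's bestRun, for nonempty lists
lemma counter_values_eq (l : List Int) :
    (PySem.Dict.counter l).values = (PySem.Set.ofList l).map (fun k => (l.count k : Int)) := by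
  show (PySem.Dict.counter l).items.map Prod.snd = _
  rw [PySem.Dict.items_counter, List.map_map]
  rfl

lemma per_list (l : List Int) (hl : l ≠ []) :
    (match PySem.List.max? (PySem.Dict.counter l).values (fun v => v) with
      | some m => m | none => 0) = bestRun l := by
  obtain ⟨a, ha⟩ := List.exists_mem_of_ne_nil l hl
  have hvals := counter_values_eq l
  have hne : (PySem.Dict.counter l).values ≠ [] := by
    rw [hvals]
    intro hc
    have : a ∈ PySem.Set.ofList l := (PySem.Set.mem_ofList l a).mpr ha
    simpa [hc] using List.mem_map_of_mem (f := fun k => (l.count k : Int)) this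
  obtain ⟨m, hm⟩ : ∃ m, PySem.List.max? (PySem.Dict.counter l).values (fun v => v) = some m := by
    cases hmax : PySem.List.max? (PySem.Dict.counter l).values (fun v => v) with
    | none => exact absurd ((PySem.List.max?_eq_none_iff _ _).mp hmax) hne
    | some m => exact ⟨m, rfl⟩
    
  rw [hm]
  -- m is some count of an element of l
  have hmmem := PySem.List.max?_mem hm
  rw [hvals] at hmmem
  obtain ⟨k, hk, hkm⟩ := List.mem_map.mp hmmem
  have hkl : k ∈ l := (PySem.Set.mem_ofList l k).mp hk
  -- m bounds all counts
  have hbound : ∀ v ∈ l, (l.count v : Int) ≤ m := by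
    intro v hv
    have hvmem : (l.count v : Int) ∈ (PySem.Dict.counter l).values := by
      rw [hvals]
      exact List.mem_map_of_mem ((PySem.Set.mem_ofList l v).mpr hv)
    exact PySem.List.max?_isMax hm _ hvmem
  obtain ⟨w, hw, hwe⟩ := bestRun_exists l hl
  refine le_antisymm ?_ ?_
  · rw [← hkm]; exact bestRun_isMax l k hkl
  · rw [hwe]; exact hbound w hw

-- 'for i in range(n): … xs[i] …' reads exactly xs.take n
lemma map_pyGetD_take (l : List Int) (m : Nat) (hm : m ≤ l.length) :
    (PySem.List.pyRange 0 (m : Int) 1).map (fun i => PySem.List.pyGetD l i 0) = l.take m := by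
  induction m with
  | zero => simp [PySem.List.pyRange]
  | succ k ih =>
    rw [show ((k + 1 : Nat) : Int) = (k : Int) + 1 by push_cast; ring,
      PySem.List.pyRange_one_succ_right (by positivity), List.map_append,
      ih (by omega), List.take_add_one]
    simp [PySem.List.pyGetD_natCast, List.getD, List.getElem?_eq_getElem (show k < l.length by omega)]

-- the branching dict update in A is the counter update
lemma fold_counter (l : List Int) :
    l.foldl (fun (d : PySem.Dict Int Int) v =>
      if d.contains v then d.insert v (d.getD v 0 + 1) else d.insert v 1) PySem.Dict.empty
      = PySem.Dict.counter l := by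
  rw [PySem.List.foldl_congr_mem l _ (fun d v => d.insert v (d.getD v 0 + 1)) _ ?_,
    PySem.Dict.foldl_insert_getD_add_one_eq_counter]
  intro d v _
  by_cases h : d.contains v
  · rw [if_pos h]
  · rw [if_neg h]
    show d.insert v 1 = d.insert v (d.getD v 0 + 1)
    rw [PySem.Dict.getD_of_not_contains d 0 (by simpa using h)]
    norm_num

lemma dict_fold_eq (l : List Int) (n : Int) (h0 : 0 ≤ n) (hn : n ≤ (l.length : Int)) :
    (PySem.List.pyRange 0 n 1).foldl (fun (d : PySem.Dict Int Int) i =>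
      if d.contains (PySem.List.pyGetD l i 0) then
        d.insert (PySem.List.pyGetD l i 0) (d.getD (PySem.List.pyGetD l i 0) 0 + 1)
      else d.insert (PySem.List.pyGetD l i 0) 1) PySem.Dict.empty
      = PySem.Dict.counter (l.take n.toNat) := by
  have hcast : PySem.List.pyRange 0 n 1 = PySem.List.pyRange 0 ((n.toNat : Int)) 1 := by
    rw [Int.toNat_of_nonneg h0]
  rw [hcast, ← fold_counter, ← map_pyGetD_take l n.toNat (by omega), List.foldl_map]

-- ===== VERDICT (by name: the statement is the Claim_ definition above) =====
theorem maxDropPoints_spec : Claim_equal_maxDropPoints := by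
  intro n x y _ hpre
  obtain ⟨h1, hx, hy⟩ := hpre
  show maxDropPoints n x y = maxDropPoints_alt n x y
  rw [maxDropPoints, maxDropPoints_alt,
    PySem.List.foldl_prod_mk
      (f := fun (d : PySem.Dict Int Int) i =>
        if d.contains (PySem.List.pyGetD x i 0) then
          d.insert (PySem.List.pyGetD x i 0) (d.getD (PySem.List.pyGetD x i 0) 0 + 1)
        else d.insert (PySem.List.pyGetD x i 0) 1)
      (g := fun (d : PySem.Dict Int Int) i =>
        if d.contains (PySem.List.pyGetD y i 0) then
          d.insert (PySem.List.pyGetD y i 0) (d.getD (PySem.List.pyGetD y i 0) 0 + 1)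
        else d.insert (PySem.List.pyGetD y i 0) 1)]
  have htx : x.take n.toNat ≠ [] := by
    intro hc
    have := congrArg List.length hc
    rw [List.length_take, List.length_nil] at this
    omega
  have hty : y.take n.toNat ≠ [] := by
    intro hc
    have := congrArg List.length hc
    rw [List.length_take, List.length_nil] at this
    omega
  simp only [dict_fold_eq x n (by omega) hx, dict_fold_eq y n (by omega) hy,
    PySem.List.slice_to _ (show (0 : Int) ≤ n by omega)]
  rw [per_list _ htx, per_list _ hty]
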